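-- pv_equiv track=rewrite | github.com/victorrndungu/ML-Dropout-Risk-Assessment | complete_upload_processor.py | _detect_hunger_with_severity
-- ===== SOURCE A (Python) =====
-- def _detect_hunger_with_severity(text: str) -> int:
--     """Detect hunger with severity: 0 = none, 1 = intermittent, 2 = constant."""
--     import re
--     text_lower = text.lower()
--
--     # Constant/severe hunger indicators (weight = 2)
--     severe_patterns = [
--         'starving', 'malnourished', 'sleep hungry', 'sleep on empty stomach',
--         'goes hungry', 'comes hungry', 'often hungry', 'frequently hungry',
--         'no food', 'lacks food', 'food shortage', 'food crisis'
--     ]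
--
--     # Intermittent hunger indicators (weight = 1)
--     intermittent_patterns = [
--         'sometimes skip', 'sometimes skips', 'sometimes goes hungry',
--         'when business is poor', 'when business is bad', 'relies on neighbors',
--         'skips breakfast', 'skip breakfast', 'occasionally', 'at times',
--         'during difficult times', 'when money is short'
--     ]
--
--     # Check for severe/constant hunger first
--     if any(pattern in text_lower for pattern in severe_patterns):
--         return 2  # Constant/severe hunger
--     elif any(pattern in text_lower for pattern in intermittent_patterns):
--         return 1  # Intermittent hunger
--     else:
--         # Check for general hunger indicators (default to intermittent if not severe)
--         general_patterns = [
--             'hungry', 'hunger', 'go without meals', 'without meals',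
--             'lack of food', 'lack sufficient food', 'not enough food',
--             'insufficient food', 'food insecurity', 'skips meals'
--         ]
--         if any(pattern in text_lower for pattern in general_patterns):
--             return 1  # Default to intermittent if severity unclear
--         return 0  # No hunger detected
-- ===== SOURCE B (Python) =====
-- def _detect_hunger_with_severity(text: str) -> int:
--     """Detect hunger with severity: 0 = none, 1 = intermittent, 2 = constant."""
--     text_lower = text.lower()
--     table = [
--         (['starving', 'malnourished', 'sleep hungry', 'sleep on empty stomach',
--           'goes hungry', 'comes hungry', 'often hungry', 'frequently hungry',
--           'no food', 'lacks food', 'food shortage', 'food crisis'], 2),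
--         (['sometimes skip', 'sometimes skips', 'sometimes goes hungry',
--           'when business is poor', 'when business is bad', 'relies on neighbors',
--           'skips breakfast', 'skip breakfast', 'occasionally', 'at times',
--           'during difficult times', 'when money is short'], 1),
--         (['hungry', 'hunger', 'go without meals', 'without meals',
--           'lack of food', 'lack sufficient food', 'not enough food',
--           'insufficient food', 'food insecurity', 'skips meals'], 1),
--     ]
--     best = 0
--     for patterns, weight in table:
--         if any(p in text_lower for p in patterns):
--             best = max(best, weight)
--     return best
-- ===== Notes on version B (the rewrite author's own statement) =====
-- stated objective: alternative
-- what changed: Replaced the prioritized if/elif early-return cascade over three pattern lists by a single max-accumulating pass over one weighted (patterns, weight) table; the result is identical because the severe tier both outranks and outvalues the others.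
import Mathlib
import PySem

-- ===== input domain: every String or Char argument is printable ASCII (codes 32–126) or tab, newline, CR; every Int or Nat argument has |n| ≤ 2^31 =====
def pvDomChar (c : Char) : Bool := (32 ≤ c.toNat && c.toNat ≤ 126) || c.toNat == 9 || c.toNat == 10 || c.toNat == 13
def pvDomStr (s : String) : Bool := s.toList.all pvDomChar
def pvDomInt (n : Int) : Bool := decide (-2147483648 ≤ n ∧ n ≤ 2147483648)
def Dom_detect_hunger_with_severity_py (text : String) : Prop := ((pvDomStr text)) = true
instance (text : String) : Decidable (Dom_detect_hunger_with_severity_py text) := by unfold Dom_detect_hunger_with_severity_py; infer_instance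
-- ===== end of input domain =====

-- B replaces A's prioritized if/elif early-return cascade by one max-accumulating pass over a weighted pattern table (alternative decomposition, same result).

-- ===== PORT A =====
def pvSevere : List String :=
  ["starving", "malnourished", "sleep hungry", "sleep on empty stomach", "goes hungry", "comes hungry", "often hungry", "frequently hungry", "no food", "lacks food", "food shortage", "food crisis"]
def pvIntermittent : List String :=
  ["sometimes skip", "sometimes skips", "sometimes goes hungry", "when business is poor", "when business is bad", "relies on neighbors", "skips breakfast", "skip breakfast", "occasionally", "at times", "during difficult times", "when money is short"]
def pvGeneral : List String :=
  ["hungry", "hunger", "go without meals", "without meals", "lack of food", "lack sufficient food", "not enough food", "insufficient food", "food insecurity", "skips meals"]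

def detect_hunger_with_severity_py (text : String) : Int :=
  let text_lower := PySem.Str.lower text
  if pvSevere.any (fun p => PySem.Str.isIn p text_lower) then 2
  else if pvIntermittent.any (fun p => PySem.Str.isIn p text_lower) then 1
  else
    if pvGeneral.any (fun p => PySem.Str.isIn p text_lower) then 1
    else 0

-- ===== PORT B =====

def pvTable : List (List String × Int) :=
  [(pvSevere, 2), (pvIntermittent, 1), (pvGeneral, 1)]

def detect_hunger_with_severity_py_alt (text : String) : Int :=
  let text_lower := PySem.Str.lower text
  pvTable.foldl
    (fun best pw =>
      if pw.1.any (fun p => PySem.Str.isIn p text_lower) then max best pw.2 else best)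
    0

-- ===== PRECONDITION & SPEC =====
def Spec_detect_hunger_with_severity_py (text : String) (out : Int) : Prop := out = detect_hunger_with_severity_py_alt text
instance (text : String) (out : Int) : Decidable (Spec_detect_hunger_with_severity_py text out) := by unfold Spec_detect_hunger_with_severity_py; infer_instance

-- ===== CLAIM (what is proved, stated in full; the proofs are below) =====
def Claim_equal_detect_hunger_with_severity_py : Prop := ∀ (text : String), Dom_detect_hunger_with_severity_py text → Spec_detect_hunger_with_severity_py text (detect_hunger_with_severity_py text)

-- ===== LEMMAS AND PROOFS =====

-- ===== VERDICT (by name: the statement is the Claim_ definition above) =====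
theorem detect_hunger_with_severity_py_spec : Claim_equal_detect_hunger_with_severity_py := by
  intro text _
  unfold Spec_detect_hunger_with_severity_py detect_hunger_with_severity_py
    detect_hunger_with_severity_py_alt pvTable
  simp only [List.foldl]
  cases hs : pvSevere.any (fun p => PySem.Str.isIn p (PySem.Str.lower text)) <;>
  cases hi : pvIntermittent.any (fun p => PySem.Str.isIn p (PySem.Str.lower text)) <;>
  cases hg : pvGeneral.any (fun p => PySem.Str.isIn p (PySem.Str.lower text)) <;>
    simp only [hs, hi, hg, if_true, if_false, Bool.false_eq_true, ite_false, ite_true] <;> decide
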